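-- pv_equiv track=rewrite | github.com/tt6746690/MEANCentralDogma | sequence.py | find_start_codon
-- ===== SOURCE A (Python) =====
-- def find_start_codon(rna_sequence):
--     # this function inputs the RNA sequence in string and returns the position of A in AUG start codon.
--     starter = []
--     starter.append(-1)
--     if len(rna_sequence) < 3:
--         return starter
--     else:
--         for i in range(0, len(rna_sequence)):
--             if rna_sequence[i] == 'A' and rna_sequence[i+1] == 'U' and rna_sequence[i+2] == 'G':
--                 starter.append(i)
--                 starter[0] = 0
--             if i+3 == len(rna_sequence):
--                 break
--         return starter
-- ===== SOURCE B (Python) =====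
-- def find_start_codon(rna_sequence):
--     positions = []
--     start = 0
--     while True:
--         idx = rna_sequence.find('AUG', start)
--         if idx == -1:
--             break
--         positions.append(idx)
--         start = idx + 1
--     return [-1] if not positions else [0] + positions
-- ===== Notes on version B (the rewrite author's own statement) =====
-- stated objective: faster
-- what changed: Replaces the indexed per-position three-character comparison loop (with break and in-place sentinel mutation) by a while loop over str.find('AUG', start) matches, building the sentinel/result at the end.
import Mathlib
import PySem

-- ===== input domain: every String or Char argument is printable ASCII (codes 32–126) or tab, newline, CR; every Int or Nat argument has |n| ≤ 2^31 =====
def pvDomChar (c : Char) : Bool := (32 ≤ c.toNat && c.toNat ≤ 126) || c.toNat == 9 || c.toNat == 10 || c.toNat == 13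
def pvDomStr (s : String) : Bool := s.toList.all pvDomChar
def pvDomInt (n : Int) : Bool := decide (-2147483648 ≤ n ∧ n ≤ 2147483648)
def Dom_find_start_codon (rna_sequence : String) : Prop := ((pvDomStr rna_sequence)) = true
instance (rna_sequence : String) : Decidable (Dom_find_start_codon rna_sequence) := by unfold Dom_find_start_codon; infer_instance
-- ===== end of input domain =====

-- B replaces A's per-index three-character comparison loop (with break and in-place
-- sentinel mutation) by a while loop over the built-in substring search find('AUG', start),
-- assembling the [-1] / [0, pos…] result at the end (objective: idiomatic).

-- ===== PORT A =====
-- 'AUG' test at position i (indices i, i+1, i+2 are in range on every executed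
-- iteration of A's loop, which breaks at i+3 == len, so getD is exact here)
def pvIsAUG (cs : List Char) (i : Nat) : Bool :=
  (cs.getD i ' ' == 'A') && (cs.getD (i+1) ' ' == 'U') && (cs.getD (i+2) ' ' == 'G')

-- A's for-loop: i over range(0, n); on a match append i and set starter[0] = 0
-- (the updated starter is written at both uses of it); break when i+3 == n
def pvLoopA (cs : List Char) (n : Nat) (i : Nat) (starter : List Int) : List Int :=
  if _h : i < n then
    if i + 3 = n then
      (if pvIsAUG cs i then (starter ++ [(i : Int)]).set 0 0 else starter)
    else
      pvLoopA cs n (i+1) (if pvIsAUG cs i then (starter ++ [(i : Int)]).set 0 0 else starter)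
  else starter
termination_by n - i

def find_start_codon (rna_sequence : String) : List Int :=
  let cs := rna_sequence.toList
  if cs.length < 3 then [-1] else pvLoopA cs cs.length 0 [-1]

-- ===== PORT B =====
-- rna_sequence.find('AUG', start): first index j ≥ start with cs[j:j+3] = "AUG",
-- none for Python's -1 (ported by hand; exact for the 3-character needle)
def pvFindAUG (cs : List Char) (start : Nat) : Option Nat :=
  if start + 3 ≤ cs.length then
    if pvIsAUG cs start then some start else pvFindAUG cs (start+1)
  else none
termination_by cs.length - start

theorem pvFindAUG_bounds {cs : List Char} {start j : Nat}
    (h : pvFindAUG cs start = some j) : start ≤ j ∧ j + 3 ≤ cs.length := by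
  fun_induction pvFindAUG cs start with
  | case1 s hle hm => simp at h; omega
  | case2 s hle hm ih => have := ih h; omega
  | case3 s hle => simp at h

-- B's while loop: collect successive match positions, restarting the search at idx+1
def pvCollect (cs : List Char) (start : Nat) : List Int :=
  match h : pvFindAUG cs start with
  | none => []
  | some j => (j : Int) :: pvCollect cs (j + 1)
termination_by cs.length + 1 - start
decreasing_by have := pvFindAUG_bounds h; omega

def find_start_codon_alt (rna_sequence : String) : List Int :=
  let positions := pvCollect rna_sequence.toList 0
  if positions = [] then [-1] else 0 :: positions

-- ===== PRECONDITION & SPEC =====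
def Spec_find_start_codon (rna_sequence : String) (out : List Int) : Prop := out = find_start_codon_alt rna_sequence
instance (rna_sequence : String) (out : List Int) : Decidable (Spec_find_start_codon rna_sequence out) := by unfold Spec_find_start_codon; infer_instance

-- ===== CLAIM (what is proved, stated in full; the proofs are below) =====
def Claim_equal_find_start_codon : Prop := ∀ (rna_sequence : String), Dom_find_start_codon rna_sequence → Spec_find_start_codon rna_sequence (find_start_codon rna_sequence)

-- ===== LEMMAS AND PROOFS =====

theorem pvCollect_none {cs : List Char} {i : Nat} (h : pvFindAUG cs i = none) :
    pvCollect cs i = [] := by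
  rw [pvCollect]; split <;> simp_all

theorem pvCollect_some {cs : List Char} {i j : Nat} (h : pvFindAUG cs i = some j) :
    pvCollect cs i = (j : Int) :: pvCollect cs (j + 1) := by
  rw [pvCollect]; split <;> simp_all

-- the list of all match positions ≥ i, the common characterisation of both loops
def pvMatchList (cs : List Char) (i : Nat) : List Nat :=
  if i + 3 ≤ cs.length then
    (if pvIsAUG cs i then [i] else []) ++ pvMatchList cs (i+1)
  else []
termination_by cs.length - i

theorem pvCollect_eq_matchList (cs : List Char) :
    ∀ k i, cs.length ≤ i + k → pvCollect cs i = (pvMatchList cs i).map Int.ofNat := by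
  intro k
  induction k with
  | zero =>
    intro i hi
    rw [pvCollect_none (by rw [pvFindAUG, if_neg (by omega)]),
        pvMatchList, if_neg (by omega)]
    simp
  | succ k ih =>
    intro i hi
    by_cases hle : i + 3 ≤ cs.length
    · by_cases hm : pvIsAUG cs i
      · rw [pvCollect_some (by rw [pvFindAUG, if_pos hle, if_pos hm]),
            pvMatchList, if_pos hle, if_pos hm, ih (i+1) (by omega)]
        simp
      · have hf : pvFindAUG cs i = pvFindAUG cs (i+1) := by
          rw [pvFindAUG, if_pos hle, if_neg hm]
        have hc : pvCollect cs i = pvCollect cs (i+1) := by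
          cases hfa : pvFindAUG cs (i+1) with
          | none => rw [pvCollect_none (hf.trans hfa), pvCollect_none hfa]
          | some j => rw [pvCollect_some (hf.trans hfa), pvCollect_some hfa]
        have hml : pvMatchList cs i = pvMatchList cs (i+1) := by
          rw [pvMatchList, if_pos hle, if_neg hm]; simp
        rw [hc, ih (i+1) (by omega), hml]
    · rw [pvCollect_none (by rw [pvFindAUG, if_neg hle]),
          pvMatchList, if_neg hle]
      simp

theorem set_zero_append (xs ys : List Int) (a : Int) (h : xs ≠ []) :
    xs.set 0 a ++ ys = (xs ++ ys).set 0 a := by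
  cases xs with
  | nil => simp at h
  | cons x xs => simp

theorem pvLoopA_spec (cs : List Char) :
    ∀ k i starter, cs.length ≤ i + k → i + 3 ≤ cs.length → starter ≠ [] →
    pvLoopA cs cs.length i starter =
      if pvMatchList cs i = [] then starter
      else ((starter ++ (pvMatchList cs i).map Int.ofNat).set 0 0) := by
  intro k
  induction k with
  | zero => intro i starter hk h3 _; omega
  | succ k ih =>
    intro i starter hk h3 hne
    have hi : i < cs.length := by omega
    rw [pvLoopA, dif_pos hi]
    by_cases hend : i + 3 = cs.length
    · have hrest : pvMatchList cs (i+1) = [] := by rw [pvMatchList, if_neg (by omega)]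
      by_cases hm : pvIsAUG cs i
      · have hml : pvMatchList cs i = [i] := by
          rw [pvMatchList, if_pos h3, if_pos hm, hrest]; simp
        rw [if_pos hend, if_pos hm, hml]
        simp
      · have hml : pvMatchList cs i = [] := by
          rw [pvMatchList, if_pos h3, if_neg hm, hrest]; simp
        rw [if_pos hend, if_neg hm, hml]
        simp
    · by_cases hm : pvIsAUG cs i
      · have hne' : (starter ++ [(i : Int)]).set 0 0 ≠ [] := by
          cases starter with
          | nil => simp at hne
          | cons x xs => simp
        have hml : pvMatchList cs i = i :: pvMatchList cs (i+1) := by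
          rw [pvMatchList, if_pos h3, if_pos hm]; simp
        rw [if_neg hend, if_pos hm, ih (i+1) _ (by omega) (by omega) hne', hml]
        by_cases hrest : pvMatchList cs (i+1) = []
        · simp [hrest]
        · rw [if_neg hrest, if_neg (by simp)]
          rw [set_zero_append _ _ _ (by
            cases starter with
            | nil => exact absurd rfl hne
            | cons x xs => simp [List.set]), List.set_set]
          simp
      · have hml : pvMatchList cs i = pvMatchList cs (i+1) := by
          rw [pvMatchList, if_pos h3, if_neg hm]; simp
        rw [if_neg hend, if_neg hm, ih (i+1) starter (by omega) (by omega) hne, hml]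

-- ===== VERDICT (by name: the statement is the Claim_ definition above) =====
theorem find_start_codon_spec : Claim_equal_find_start_codon := by
  intro s _
  unfold Spec_find_start_codon
  simp only [find_start_codon, find_start_codon_alt]
  generalize s.toList = cs
  by_cases h3 : cs.length < 3
  · have hc : pvCollect cs 0 = [] :=
      pvCollect_none (by rw [pvFindAUG, if_neg (by omega)])
    simp [h3, hc]
  · rw [if_neg h3, pvLoopA_spec cs cs.length 0 [-1] (by omega) (by omega) (by simp),
        pvCollect_eq_matchList cs cs.length 0 (by omega)]
    by_cases hml : pvMatchList cs 0 = []
    · simp [hml]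
    · rw [if_neg hml, if_neg (by simp [hml])]
      cases hM : pvMatchList cs 0 with
      | nil => exact absurd hM hml
      | cons a l => simp
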